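-- pv_equiv track=rewrite | github.com/PhoenixZ810/MM-HELIX | sandbox/generator/aquarium_generator.py | _get_region_cells_mapping
-- ===== SOURCE A (Python) =====
-- def _get_region_cells_mapping(regions, grid_rows, grid_cols):
--     """Get mapping of region_id to list of cells (r,c) in that region"""
--     region_cells = {}
--     for r in range(grid_rows):
--         for c in range(grid_cols):
--             region_id = regions[r][c]
--             if region_id not in region_cells:
--                 region_cells[region_id] = []
--             region_cells[region_id].append((r, c))
--     return region_cells
-- ===== SOURCE B (Python) =====
-- def _get_region_cells_mapping(regions, grid_rows, grid_cols):
--     """Get mapping of region_id to list of cells (r,c) in that region"""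
--     flat = [(regions[r][c], (r, c))
--             for r in range(grid_rows)
--             for c in range(grid_cols)]
--     return {rid: [cell for key, cell in flat if key == rid]
--             for rid in dict.fromkeys(key for key, _ in flat)}
-- ===== Notes on version B (the rewrite author's own statement) =====
-- stated objective: alternative
-- what changed: A builds the dict in one interleaved pass with a membership check and append per cell; B first flattens the grid into (region_id, cell) pairs, then constructs the dict as a comprehension over dict.fromkeys of the ids (first-occurrence order) with each region's cells obtained by filtering the flat list.
import Mathlib
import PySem

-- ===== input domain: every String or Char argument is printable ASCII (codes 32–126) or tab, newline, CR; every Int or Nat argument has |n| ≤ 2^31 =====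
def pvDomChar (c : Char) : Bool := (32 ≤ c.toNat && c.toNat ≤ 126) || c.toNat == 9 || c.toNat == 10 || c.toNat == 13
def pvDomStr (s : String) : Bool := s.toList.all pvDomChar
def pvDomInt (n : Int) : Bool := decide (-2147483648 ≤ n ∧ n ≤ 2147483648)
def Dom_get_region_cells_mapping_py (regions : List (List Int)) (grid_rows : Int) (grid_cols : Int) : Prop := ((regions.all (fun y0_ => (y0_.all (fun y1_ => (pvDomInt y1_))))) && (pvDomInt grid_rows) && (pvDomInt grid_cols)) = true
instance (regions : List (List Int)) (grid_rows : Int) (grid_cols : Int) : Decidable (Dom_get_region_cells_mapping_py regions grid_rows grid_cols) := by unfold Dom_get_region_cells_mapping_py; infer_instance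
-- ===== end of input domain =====

-- B replaces A's interleaved membership-check/append grouping loop by: flatten the grid into
-- (region_id, cell) pairs once, then build the dict directly as a comprehension over the
-- deduplicated key order (dict.fromkeys) with each value a filter of the flat list (objective: alternative).

-- ===== PORT A =====
-- literal port of A's nested index loops; pyGetD's defaults are never reached inside Pre_ (Pre_ excludes A's IndexError inputs)
def get_region_cells_mapping_py (regions : List (List Int)) (grid_rows : Int) (grid_cols : Int) : List (Int × List (Int × Int)) :=
  ((PySem.List.pyRange 0 grid_rows 1).foldl (fun d r =>
    (PySem.List.pyRange 0 grid_cols 1).foldl (fun d c =>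
      let region_id := PySem.List.pyGetD (PySem.List.pyGetD regions r []) c 0
      let d := if d.contains region_id then d else d.insert region_id []
      d.modify region_id [] (· ++ [(r, c)])) d) PySem.Dict.empty).items

-- ===== PORT B =====
def get_region_cells_mapping_py_alt (regions : List (List Int)) (grid_rows : Int) (grid_cols : Int) : List (Int × List (Int × Int)) :=
  let flat := (PySem.List.pyRange 0 grid_rows 1).flatMap (fun r =>
    (PySem.List.pyRange 0 grid_cols 1).map (fun c =>
      (PySem.List.pyGetD (PySem.List.pyGetD regions r []) c 0, (r, c))))
  (PySem.List.dedup (flat.map (fun p => p.1))).map (fun rid =>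
    (rid, (flat.filter (fun p => p.1 == rid)).map (fun p => p.2)))

-- ===== PRECONDITION & SPEC =====
-- Pre_ excludes exactly the inputs where A raises IndexError (regions[r] or regions[r][c] out of
-- range for some visited r < grid_rows, c < grid_cols); when either dimension is ≤ 0 no cell is
-- ever indexed and A returns {}.
def Pre_get_region_cells_mapping_py (regions : List (List Int)) (grid_rows : Int) (grid_cols : Int) : Prop :=
  grid_rows ≤ 0 ∨ grid_cols ≤ 0 ∨
    (grid_rows ≤ regions.length ∧ ∀ row ∈ regions.take grid_rows.toNat, grid_cols ≤ row.length)
instance (regions : List (List Int)) (grid_rows : Int) (grid_cols : Int) : Decidable (Pre_get_region_cells_mapping_py regions grid_rows grid_cols) := by unfold Pre_get_region_cells_mapping_py; infer_instance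
def pvWitness_get_region_cells_mapping_py : List (List Int) × Int × Int := ([[1, 2], [2, 1]], 2, 2)

def Spec_get_region_cells_mapping_py (regions : List (List Int)) (grid_rows : Int) (grid_cols : Int) (out : List (Int × List (Int × Int))) : Prop := out = get_region_cells_mapping_py_alt regions grid_rows grid_cols
instance (regions : List (List Int)) (grid_rows : Int) (grid_cols : Int) (out : List (Int × List (Int × Int))) : Decidable (Spec_get_region_cells_mapping_py regions grid_rows grid_cols out) := by unfold Spec_get_region_cells_mapping_py; infer_instance

-- ===== CLAIM (what is proved, stated in full; the proofs are below) =====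
def Claim_equal_get_region_cells_mapping_py : Prop := ∀ (regions : List (List Int)) (grid_rows : Int) (grid_cols : Int), Dom_get_region_cells_mapping_py regions grid_rows grid_cols → Pre_get_region_cells_mapping_py regions grid_rows grid_cols → Spec_get_region_cells_mapping_py regions grid_rows grid_cols (get_region_cells_mapping_py regions grid_rows grid_cols)

-- ===== LEMMAS AND PROOFS =====

-- the body of A's inner loop, as a function of the (region_id, cell) pair it processes
def pvStepA (d : PySem.Dict Int (List (Int × Int))) (p : Int × (Int × Int)) : PySem.Dict Int (List (Int × Int)) :=
  let d' := if d.contains p.1 then d else d.insert p.1 []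
  d'.modify p.1 [] (· ++ [p.2])

lemma pvStepA_keys (d : PySem.Dict Int (List (Int × Int))) (p : Int × (Int × Int)) :
    (pvStepA d p).keys = PySem.Set.add d.keys p.1 := by
  unfold pvStepA
  cases h : d.contains p.1 with
  | true =>
      simp [PySem.Dict.keys_modify, PySem.Dict.keys_insert_of_contains _ _ h,
        PySem.Set.add, PySem.Set.contains, (PySem.Dict.contains_iff_mem_keys d p.1).mp h]
  | false =>
      have hk : ¬ p.1 ∈ d.keys := fun hm => by
        simp [(PySem.Dict.contains_iff_mem_keys d p.1).mpr hm] at h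
      simp [PySem.Dict.keys_modify, PySem.Dict.keys_insert_of_not_contains _ _ h,
        PySem.Dict.keys_insert_of_contains _ _ (PySem.Dict.contains_insert_self d p.1 []),
        PySem.Set.add, PySem.Set.contains, hk]

lemma pvStepA_nodup (d : PySem.Dict Int (List (Int × Int))) (p : Int × (Int × Int))
    (h : d.keys.Nodup) : (pvStepA d p).keys.Nodup := by
  rw [pvStepA_keys]
  exact PySem.Set.nodup_add _ _ h

lemma pvStepA_getD (d : PySem.Dict Int (List (Int × Int))) (p : Int × (Int × Int)) (k : Int) :
    (pvStepA d p).getD k [] = if k = p.1 then d.getD p.1 [] ++ [p.2] else d.getD k [] := by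
  unfold pvStepA
  cases h : d.contains p.1 with
  | true => simp [PySem.Dict.getD_modify]
  | false =>
      rw [if_neg (by simp)]
      rw [PySem.Dict.getD_modify]
      by_cases hk : k = p.1
      · simp [hk, PySem.Dict.getD_of_not_contains d _ h]
      · simp [hk, PySem.Dict.getD_insert]

lemma pvFoldA_keys (l : List (Int × (Int × Int))) (d : PySem.Dict Int (List (Int × Int))) :
    (l.foldl pvStepA d).keys = PySem.Set.update d.keys (l.map (fun p => p.1)) := by
  induction l generalizing d with
  | nil => simp [PySem.Set.update]
  | cons p l ih =>
      simp only [List.foldl_cons, List.map_cons, PySem.Set.update, List.foldl_cons]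
      rw [ih, ← pvStepA_keys]
      rfl

lemma pvFoldA_nodup (l : List (Int × (Int × Int))) (d : PySem.Dict Int (List (Int × Int)))
    (h : d.keys.Nodup) : (l.foldl pvStepA d).keys.Nodup := by
  induction l generalizing d with
  | nil => exact h
  | cons p l ih => exact ih _ (pvStepA_nodup _ _ h)

lemma pvFoldA_getD (l : List (Int × (Int × Int))) (d : PySem.Dict Int (List (Int × Int))) (k : Int) :
    (l.foldl pvStepA d).getD k [] = d.getD k [] ++ (l.filter (fun p => p.1 == k)).map (fun p => p.2) := by
  induction l generalizing d with
  | nil => simp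
  | cons p l ih =>
      simp only [List.foldl_cons, List.filter_cons]
      rw [ih, pvStepA_getD]
      by_cases hk : k = p.1
      · simp [hk, List.append_assoc]
      · simp [hk, Ne.symm hk]

lemma pvFoldA_items (l : List (Int × (Int × Int))) :
    (l.foldl pvStepA PySem.Dict.empty).items
      = (PySem.List.dedup (l.map (fun p => p.1))).map (fun k =>
          (k, (l.filter (fun p => p.1 == k)).map (fun p => p.2))) := by
  rw [PySem.Dict.items_eq_map_keys _ (pvFoldA_nodup l _ (by simp)) []]
  rw [pvFoldA_keys]
  apply List.map_congr_left
  intro k _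
  rw [pvFoldA_getD]
  simp

theorem pv_ports_eq (regions : List (List Int)) (grid_rows grid_cols : Int) :
    get_region_cells_mapping_py regions grid_rows grid_cols
      = get_region_cells_mapping_py_alt regions grid_rows grid_cols := by
  unfold get_region_cells_mapping_py get_region_cells_mapping_py_alt
  rw [← pvFoldA_items]
  rw [List.foldl_flatMap]
  simp only [List.foldl_map]
  rfl

-- ===== VERDICT (by name: the statement is the Claim_ definition above) =====
theorem get_region_cells_mapping_py_spec : Claim_equal_get_region_cells_mapping_py := by
  intro regions grid_rows grid_cols _ _
  exact pv_ports_eq regions grid_rows grid_cols
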